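-- pv_equiv track=rewrite | github.com/NewonOnGit/K43LTR0N | python tests/verification_suite_v2.py | shell_count
-- ===== SOURCE A (Python) =====
-- def shell_count(C):
--     if C == 0: return 1
--     count = 0
--     for r in range(-C, C+1):
--         for d in range(-C, C+1):
--             for c in range(-C, C+1):
--                 b_needed = C - abs(r) - abs(d) - abs(c)
--                 if b_needed >= 0:
--                     count += (2 if b_needed > 0 else 1)
--     return count
-- ===== SOURCE B (Python) =====
-- def shell_count(C):
--     # closed form: number of integer points (r, d, c, b) with |r|+|d|+|c|+|b| == C
--     if C < 0:
--         return 0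
--     if C == 0:
--         return 1
--     return 8 * C * (C * C + 2) // 3
-- ===== Notes on version B (the rewrite author's own statement) =====
-- stated objective: faster
-- what changed: Replaced the cubic triple nested loop with a direct closed-form cubic polynomial evaluation (the surface lattice-point count of the four-dimensional cross-polytope).
import Mathlib
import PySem

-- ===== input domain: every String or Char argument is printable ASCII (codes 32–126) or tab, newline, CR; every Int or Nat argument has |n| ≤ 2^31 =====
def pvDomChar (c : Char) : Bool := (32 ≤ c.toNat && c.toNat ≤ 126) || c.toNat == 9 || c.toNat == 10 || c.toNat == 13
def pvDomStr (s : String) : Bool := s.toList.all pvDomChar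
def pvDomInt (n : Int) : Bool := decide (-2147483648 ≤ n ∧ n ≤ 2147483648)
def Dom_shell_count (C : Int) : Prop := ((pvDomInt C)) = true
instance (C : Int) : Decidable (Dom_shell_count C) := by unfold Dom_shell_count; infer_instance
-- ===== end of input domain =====

-- B replaces A's cubic triple loop by a closed-form cubic polynomial evaluation (objective: faster).


-- ===== PORT A =====
def shell_count (C : Int) : Int :=
  if C = 0 then 1 else
  (PySem.List.pyRange (-C) (C + 1) 1).foldl (fun count r =>
    (PySem.List.pyRange (-C) (C + 1) 1).foldl (fun count d =>
      (PySem.List.pyRange (-C) (C + 1) 1).foldl (fun count c =>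
        let b_needed := C - |r| - |d| - |c|
        if b_needed ≥ 0 then count + (if b_needed > 0 then 2 else 1) else count)
        count) count) 0

-- ===== PORT B =====
def shell_count_alt (C : Int) : Int :=
  if C < 0 then 0
  else if C = 0 then 1
  else PySem.Int.floordiv (8 * C * (C * C + 2)) 3

-- ===== PRECONDITION & SPEC =====
def Spec_shell_count (C : Int) (out : Int) : Prop := out = shell_count_alt C
instance (C : Int) (out : Int) : Decidable (Spec_shell_count C out) := by unfold Spec_shell_count; infer_instance

-- ===== CLAIM (what is proved, stated in full; the proofs are below) =====
def Claim_equal_shell_count : Prop := ∀ (C : Int), Dom_shell_count C → Spec_shell_count C (shell_count C)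

-- ===== LEMMAS AND PROOFS =====

-- weight of one b-coordinate: number of b with |b| = t
def pvG (t : Int) : Int := if t ≥ 0 then (if t > 0 then 2 else 1) else 0

-- closed form of the innermost sum (points (c,b) with |c|+|b| = m)
def pvS1 (m : Int) : Int := if m ≤ 0 then (if m = 0 then 1 else 0) else 4 * m

-- closed form of the middle sum (points (d,c,b) with |d|+|c|+|b| = n)
def pvS2 (n : Int) : Int := if n ≤ 0 then (if n = 0 then 1 else 0) else 4 * n * n + 2

lemma pv_foldl_if_eq_add (C r d : Int) (init : Int) (l : List Int) :
    l.foldl (fun count c =>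
      let b_needed := C - |r| - |d| - |c|
      if b_needed ≥ 0 then count + (if b_needed > 0 then 2 else 1) else count) init
    = init + (l.map (fun c => pvG (C - |r| - |d| - |c|))).sum := by
  have hf : (fun (count c : Int) =>
      let b_needed := C - |r| - |d| - |c|
      if b_needed ≥ 0 then count + (if b_needed > 0 then 2 else 1) else count)
      = fun (count c : Int) => count + pvG (C - |r| - |d| - |c|) := by
    funext count c
    simp only [pvG]
    split_ifs with h1 h2 <;> omega
  rw [hf, PySem.List.foldl_add l _ init]

-- symmetric-range sum: sum of f |x| for x in range(-a, a+1)
lemma pv_sym (f : Int → Int) (a : Nat) :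
    ((PySem.List.pyRange (-(a : Int)) ((a : Int) + 1) 1).map (fun x => f |x|)).sum
    = f 0 + 2 * ((List.range a).map (fun k : Nat => f ((k : Int) + 1))).sum := by
  induction a with
  | zero =>
    have h0 : PySem.List.pyRange (-((0 : Nat) : Int)) (((0 : Nat) : Int) + 1) 1 = [0] := by
      simpa using PySem.List.pyRange_one_singleton 0
    rw [h0]; simp
  | succ a ih =>
    have h1 : PySem.List.pyRange (-((a + 1 : Nat) : Int)) (((a + 1 : Nat) : Int) + 1) 1
        = (-((a + 1 : Nat) : Int)) :: PySem.List.pyRange (-((a : Nat) : Int)) (((a : Nat) : Int) + 1 + 1) 1 := by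
      have := PySem.List.pyRange_one_cons (a := -((a + 1 : Nat) : Int)) (b := ((a + 1 : Nat) : Int) + 1) (by push_cast; omega)
      rw [this]
      congr 1 <;> push_cast <;> ring_nf
    have h2 : PySem.List.pyRange (-((a : Nat) : Int)) (((a : Nat) : Int) + 1 + 1) 1
        = PySem.List.pyRange (-((a : Nat) : Int)) (((a : Nat) : Int) + 1) 1 ++ [((a : Nat) : Int) + 1] := by
      exact PySem.List.pyRange_one_succ_right (by push_cast; omega)
    have ha1 : |(-((a + 1 : Nat) : Int))| = ((a : Nat) : Int) + 1 := by
      rw [abs_of_nonpos (by push_cast; omega)]; push_cast; ring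
    have ha2 : |((a : Nat) : Int) + 1| = ((a : Nat) : Int) + 1 := abs_of_nonneg (by positivity)
    rw [h1, h2, List.range_succ, List.map_cons, List.map_append, List.sum_cons, List.sum_append,
      List.map_append, List.map_cons, List.map_nil, List.sum_append, List.sum_cons, List.sum_nil,
      ih, ha1, ha2]
    simp only [List.map_cons, List.map_nil, List.sum_cons, List.sum_nil]
    push_cast
    ring

lemma pv_tail1 (m : Int) (a : Nat) :
    ((List.range a).map (fun k : Nat => pvG (m - ((k : Int) + 1)))).sum
    = if m ≤ 0 then 0 else if m ≤ (a : Int) then 2 * m - 1 else 2 * a := by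
  induction a with
  | zero =>
    simp only [List.range_zero, List.map_nil, List.sum_nil, Nat.cast_zero]
    split_ifs <;> omega
  | succ a ih =>
    rw [List.range_succ, List.map_append, List.sum_append, List.map_cons, List.map_nil,
      List.sum_cons, List.sum_nil, ih]
    simp only [pvG]
    push_cast
    split_ifs <;> omega

lemma pv_tail2 (n : Int) (a : Nat) :
    ((List.range a).map (fun k : Nat => pvS1 (n - ((k : Int) + 1)))).sum
    = if n ≤ 0 then 0 else if n ≤ (a : Int) then 2 * n * n - 2 * n + 1
      else 4 * a * n - 2 * a * a - 2 * a := by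
  induction a with
  | zero =>
    simp only [List.range_zero, List.map_nil, List.sum_nil, Nat.cast_zero]
    split_ifs <;> omega
  | succ a ih =>
    rw [List.range_succ, List.map_append, List.sum_append, List.map_cons, List.map_nil,
      List.sum_cons, List.sum_nil, ih]
    simp only [pvS1]
    push_cast
    split_ifs <;>
      first
        | omega
        | ring1
        | (have hn : n = (a : Int) + 1 := by omega; rw [hn]; ring1)
        | nlinarith [sq_nonneg ((a:Int) - n), sq_nonneg ((a:Int) + 1 - n)]

lemma pv_tail3 (n : Int) (a : Nat) :
    3 * ((List.range a).map (fun k : Nat => pvS2 (n - ((k : Int) + 1)))).sum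
    = if n ≤ 0 then 0 else if n ≤ (a : Int) then 4 * n ^ 3 - 6 * n ^ 2 + 8 * n - 3
      else 12 * a * (n - 1) ^ 2 - 12 * (n - 1) * a * (a - 1) + 2 * a * (a - 1) * (2 * a - 1) + 6 * a := by
  induction a with
  | zero =>
    simp only [List.range_zero, List.map_nil, List.sum_nil, Nat.cast_zero, mul_zero]
    split_ifs <;> nlinarith
  | succ a ih =>
    rw [List.range_succ, List.map_append, List.sum_append, List.map_cons, List.map_nil,
      List.sum_cons, List.sum_nil, mul_add, ih]
    simp only [pvS2]
    push_cast
    split_ifs <;>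
      first
        | omega
        | ring1
        | (have hn : n = (a : Int) + 1 := by omega; rw [hn]; ring1)
        | nlinarith [sq_nonneg ((a:Int) - n), sq_nonneg ((a:Int) + 1 - n)]

lemma pv_level1 (a : Nat) (m : Int) (hm : m ≤ (a : Int)) :
    ((PySem.List.pyRange (-(a : Int)) ((a : Int) + 1) 1).map
      (fun x => pvG (m - |x|))).sum = pvS1 m := by
  rw [pv_sym (fun t => pvG (m - t)) a]
  have := pv_tail1 m a
  simp only [sub_add_eq_sub_sub] at this ⊢
  rw [this]
  simp only [pvG, pvS1, sub_zero]
  split_ifs <;> omega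

lemma pv_level2 (a : Nat) (n : Int) (hn : n ≤ (a : Int)) :
    ((PySem.List.pyRange (-(a : Int)) ((a : Int) + 1) 1).map
      (fun x => pvS1 (n - |x|))).sum = pvS2 n := by
  rw [pv_sym (fun t => pvS1 (n - t)) a]
  have := pv_tail2 n a
  simp only [sub_add_eq_sub_sub] at this ⊢
  rw [this]
  simp only [pvS1, pvS2, sub_zero]
  split_ifs <;> nlinarith

lemma pv_total (a : Nat) (ha : 1 ≤ a) :
    (PySem.List.pyRange (-(a : Int)) ((a : Int) + 1) 1).foldl (fun count r =>
      (PySem.List.pyRange (-(a : Int)) ((a : Int) + 1) 1).foldl (fun count d =>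
        (PySem.List.pyRange (-(a : Int)) ((a : Int) + 1) 1).foldl (fun count c =>
          let b_needed := (a : Int) - |r| - |d| - |c|
          if b_needed ≥ 0 then count + (if b_needed > 0 then 2 else 1) else count)
          count) count) 0
    = PySem.Int.floordiv (8 * (a : Int) * ((a : Int) * (a : Int) + 2)) 3 := by
  set R := PySem.List.pyRange (-(a : Int)) ((a : Int) + 1) 1 with hR
  have hmid : ∀ (r count : Int),
      R.foldl (fun count d =>
        R.foldl (fun count c =>
          let b_needed := (a : Int) - |r| - |d| - |c|
          if b_needed ≥ 0 then count + (if b_needed > 0 then 2 else 1) else count)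
          count) count
      = count + (R.map (fun d => (R.map (fun c => pvG ((a : Int) - |r| - |d| - |c|))).sum)).sum := by
    intro r count
    have hf : (fun (count d : Int) =>
        R.foldl (fun count c =>
          let b_needed := (a : Int) - |r| - |d| - |c|
          if b_needed ≥ 0 then count + (if b_needed > 0 then 2 else 1) else count)
          count)
        = fun (count d : Int) => count + (R.map (fun c => pvG ((a : Int) - |r| - |d| - |c|))).sum := by
      funext count d
      exact pv_foldl_if_eq_add (a : Int) r d count R
    rw [hf, PySem.List.foldl_add R _ count]
  have houter :
      R.foldl (fun count r =>
        R.foldl (fun count d =>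
          R.foldl (fun count c =>
            let b_needed := (a : Int) - |r| - |d| - |c|
            if b_needed ≥ 0 then count + (if b_needed > 0 then 2 else 1) else count)
            count) count) 0
      = 0 + (R.map (fun r => (R.map (fun d => (R.map (fun c => pvG ((a : Int) - |r| - |d| - |c|))).sum)).sum)).sum := by
    have hf : (fun (count r : Int) =>
        R.foldl (fun count d =>
          R.foldl (fun count c =>
            let b_needed := (a : Int) - |r| - |d| - |c|
            if b_needed ≥ 0 then count + (if b_needed > 0 then 2 else 1) else count)
            count) count)
        = fun (count r : Int) => count + (R.map (fun d => (R.map (fun c => pvG ((a : Int) - |r| - |d| - |c|))).sum)).sum := by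
      funext count r
      exact hmid r count
    rw [hf, PySem.List.foldl_add R _ 0]
  rw [houter, zero_add]
  have hstep1 : (fun (r : Int) => (R.map (fun d => (R.map (fun c => pvG ((a : Int) - |r| - |d| - |c|))).sum)).sum)
      = fun (r : Int) => pvS2 ((a : Int) - |r|) := by
    funext r
    have hstep0 : (fun (d : Int) => (R.map (fun c => pvG ((a : Int) - |r| - |d| - |c|))).sum)
        = fun (d : Int) => pvS1 ((a : Int) - |r| - |d|) := by
      funext d
      exact pv_level1 a ((a : Int) - |r| - |d|) (by have := abs_nonneg r; have := abs_nonneg d; omega)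
    rw [hstep0]
    exact pv_level2 a ((a : Int) - |r|) (by have := abs_nonneg r; omega)
  rw [hstep1, hR, pv_sym (fun t => pvS2 ((a : Int) - t)) a]
  have h3 := pv_tail3 (a : Int) a
  have hsum : ((List.range a).map (fun k : Nat => pvS2 ((a : Int) - ((k : Int) + 1)))).sum
      = ((List.range a).map (fun k : Nat => pvS2 ((a : Int) - (k : Int) - 1))).sum := by
    simp only [sub_add_eq_sub_sub]
  rw [if_neg (by omega), if_pos (le_refl _)] at h3
  have h3' : 3 * ((List.range a).map (fun k : Nat => pvS2 ((a : Int) - ((k : Int) + 1)))).sum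
      = 4 * (a : Int) ^ 3 - 6 * (a : Int) ^ 2 + 8 * (a : Int) - 3 := by
    rw [hsum]
    have heq : ((List.range a).map (fun k : Nat => pvS2 ((a : Int) - (k : Int) - 1))).sum
        = ((List.range a).map (fun k : Nat => pvS2 ((a : Int) - ((k : Int) + 1)))).sum := hsum.symm
    calc 3 * ((List.range a).map (fun k : Nat => pvS2 ((a : Int) - (k : Int) - 1))).sum
        = 3 * ((List.range a).map (fun k : Nat => pvS2 ((a : Int) - ((k : Int) + 1)))).sum := by rw [← hsum]
      _ = 4 * (a : Int) ^ 3 - 6 * (a : Int) ^ 2 + 8 * (a : Int) - 3 := h3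
  have hS2 : pvS2 (a : Int) = 4 * (a : Int) * (a : Int) + 2 := by
    simp only [pvS2]
    rw [if_neg (by omega)]
  have hval : 3 * (pvS2 ((a : Int) - |(0 : Int)|) + 2 * ((List.range a).map (fun k : Nat => pvS2 ((a : Int) - ((k : Int) + 1)))).sum)
      = 8 * (a : Int) * ((a : Int) * (a : Int) + 2) := by
    rw [abs_zero, sub_zero, mul_add, hS2]
    rw [show (3 : Int) * (2 * ((List.range a).map (fun k : Nat => pvS2 ((a : Int) - ((k : Int) + 1)))).sum)
        = 2 * (3 * ((List.range a).map (fun k : Nat => pvS2 ((a : Int) - ((k : Int) + 1)))).sum) by ring, h3']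
    ring
  have hfd : PySem.Int.floordiv (8 * (a : Int) * ((a : Int) * (a : Int) + 2)) 3
      = pvS2 ((a : Int) - |(0 : Int)|) + 2 * ((List.range a).map (fun k : Nat => pvS2 ((a : Int) - ((k : Int) + 1)))).sum := by
    rw [← hval, PySem.Int.floordiv_eq_ediv_of_pos (by norm_num)]
    omega
  rw [hfd, abs_zero]

-- ===== VERDICT (by name: the statement is the Claim_ definition above) =====
theorem shell_count_spec : Claim_equal_shell_count := by
  intro C _
  unfold Spec_shell_count shell_count shell_count_alt
  rcases lt_trichotomy C 0 with hneg | hzero | hpos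
  · rw [if_neg (by omega), if_pos hneg]
    rw [PySem.List.pyRange_one_eq_nil (by omega)]
    rfl
  · rw [if_pos hzero, if_neg (by omega), if_pos hzero]
  · rw [if_neg (by omega), if_neg (by omega), if_neg (by omega)]
    obtain ⟨a, rfl⟩ : ∃ a : Nat, C = (a : Int) := ⟨C.toNat, (Int.toNat_of_nonneg (by omega)).symm⟩
    exact pv_total a (by omega)
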